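-- pv_equiv track=rewrite | github.com/AndrewRocky/vernam-cipher-cli | vernam_gamma.py | vernam_gamma_crypt
-- ===== SOURCE A (Python) =====
-- def isEnglish(char):
--     if 'a' <= char <= 'z':
--         return True
--     else:
--         return False
--
-- def vernam_gamma_crypt(text, key, decrypt_mode=False):
--     text = text.lower()
--     key = key.lower()
--
--     alph_strength = 26 #set alphabet strength
--     offset = 97 # offset (e.g since ord('a')=97 -> offset=96)
--     result = ""
--
--     #check for wrong symbols in input
--     if not(all(isEnglish(x) or x.isspace() for x in text)):
--         raise ValueError("Wrong symbols in original text!")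
--     if not(all(isEnglish(x) for x in key)):
--         raise ValueError("Wrong symbols or spaces in private key!")
--
--     i=0
--     for char in text:
--         gamma = ord(key[i%len(key)]) - offset
--         if char == " " or char == "\n":
--             result += char
--             continue
--         char = ord(char) - offset
--         if decrypt_mode:
--             intermed_result = (alph_strength + char - gamma)%alph_strength
--         else: # encrypt mode
--             intermed_result = (char + gamma) % alph_strength
--         result += chr(intermed_result + offset)
--         i += 1
--
--     return result
-- ===== SOURCE B (Python) =====
-- def vernam_gamma_crypt(text, key, decrypt_mode=False):
--     # Different decomposition: validate, then encrypt only the non-pass-through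
--     # subsequence by zipping it with the cycled key, then rebuild the output.
--     text = text.lower()
--     key = key.lower()
--     if any(not ('a' <= c <= 'z' or c.isspace()) for c in text):
--         raise ValueError("Wrong symbols in original text!")
--     if any(not ('a' <= c <= 'z') for c in key):
--         raise ValueError("Wrong symbols or spaces in private key!")
--     core = [c for c in text if c != ' ' and c != '\n']
--     if decrypt_mode:
--         transformed = [chr((26 + (ord(c) - 97) - (ord(key[i % len(key)]) - 97)) % 26 + 97)
--                        for i, c in enumerate(core)]
--     else:
--         transformed = [chr(((ord(c) - 97) + (ord(key[i % len(key)]) - 97)) % 26 + 97)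
--                        for i, c in enumerate(core)]
--     it = iter(transformed)
--     return "".join(c if c == ' ' or c == '\n' else next(it) for c in text)
-- ===== Notes on version B (the rewrite author's own statement) =====
-- stated objective: alternative
-- what changed: A's single index-tracking loop that appends to a growing result string is replaced by a three-stage pipeline: filter out the pass-through characters, transform the remaining subsequence by zipping it with the cycled key via enumerate, then rebuild the output by merging the transformed stream back into the pass-through skeleton with join.
import Mathlib
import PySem

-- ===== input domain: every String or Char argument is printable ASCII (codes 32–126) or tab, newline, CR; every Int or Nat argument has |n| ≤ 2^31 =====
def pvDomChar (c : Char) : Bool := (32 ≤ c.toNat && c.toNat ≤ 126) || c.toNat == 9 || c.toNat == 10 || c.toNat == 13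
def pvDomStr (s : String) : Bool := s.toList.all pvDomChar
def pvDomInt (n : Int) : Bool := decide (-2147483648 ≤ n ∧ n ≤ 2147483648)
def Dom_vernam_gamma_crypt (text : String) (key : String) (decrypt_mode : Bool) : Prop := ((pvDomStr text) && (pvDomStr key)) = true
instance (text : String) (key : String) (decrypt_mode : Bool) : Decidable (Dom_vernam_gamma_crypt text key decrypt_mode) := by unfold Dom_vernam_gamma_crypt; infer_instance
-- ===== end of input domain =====

-- B replaces A's single accumulating loop by filter + indexed map over the cycled key + rebuild (alternative decomposition, same cost).

-- ===== PORT A =====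
def isEnglishA (c : Char) : Bool :=
  if 'a' ≤ c ∧ c ≤ 'z' then true else false

-- A's for-loop: state is (i, result); result += ports as list append.
-- key[i % len(key)]: with key ≠ [] (Pre_) i % len is in range, so getD is exact;
-- with key = [] Python raises ZeroDivisionError (excluded by Pre_).
def aLoop (k : List Char) (dm : Bool) : List Char → Nat → List Char → List Char
  | [], _, res => res
  | c :: rest, i, res =>
    let gamma : Int := ((k.getD (i % k.length) 'a').toNat : Int) - 97
    if c = ' ' ∨ c = '\n' then aLoop k dm rest i (res ++ [c])
    else
      let ch : Int := (c.toNat : Int) - 97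
      let im : Int := if dm then PySem.Int.mod (26 + ch - gamma) 26
                      else PySem.Int.mod (ch + gamma) 26
      aLoop k dm rest (i + 1) (res ++ [Char.ofNat (im + 97).toNat])

def vernam_gamma_crypt (text : String) (key : String) (decrypt_mode : Bool) : String :=
  let t := PySem.Str.lower text
  let k := PySem.Str.lower key
  if !(t.toList.all (fun c => isEnglishA c || PySem.Chars.isspace c)) then ""  -- raise ValueError (excluded by Pre_)
  else if !(k.toList.all (fun c => isEnglishA c)) then ""                      -- raise ValueError (excluded by Pre_)
  else String.mk (aLoop k.toList decrypt_mode t.toList 0 [])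

-- ===== PORT B =====
-- chr((26 + (ord c - 97) - gamma) % 26 + 97) with gamma = ord(key[i % len(key)]) - 97
def bDecChar (k : List Char) (i : Int) (c : Char) : Char :=
  let gamma : Int := (((PySem.List.pyGet? k (PySem.Int.mod i k.length)).getD 'a').toNat : Int) - 97
  Char.ofNat ((PySem.Int.mod (26 + ((c.toNat : Int) - 97) - gamma) 26) + 97).toNat

def bEncChar (k : List Char) (i : Int) (c : Char) : Char :=
  let gamma : Int := (((PySem.List.pyGet? k (PySem.Int.mod i k.length)).getD 'a').toNat : Int) - 97
  Char.ofNat ((PySem.Int.mod (((c.toNat : Int) - 97) + gamma) 26) + 97).toNat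

-- "".join(c if c == ' ' or c == '\n' else next(it) for c in text): pull from the
-- transformed list at each non-pass-through position (it is never exhausted).
def bJoin : List Char → List Char → List Char
  | [], _ => []
  | c :: rest, ts =>
    if c = ' ' ∨ c = '\n' then c :: bJoin rest ts
    else match ts with
      | [] => []           -- next() exhausted: unreachable, transformed has exactly enough
      | u :: ts' => u :: bJoin rest ts'

def vernam_gamma_crypt_alt (text : String) (key : String) (decrypt_mode : Bool) : String :=
  let t := PySem.Str.lower text
  let k := PySem.Str.lower key
  if t.toList.any (fun c => !(decide ('a' ≤ c ∧ c ≤ 'z') || PySem.Chars.isspace c)) then ""  -- raise ValueError (excluded by Pre_)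
  else if k.toList.any (fun c => !(decide ('a' ≤ c ∧ c ≤ 'z'))) then ""                       -- raise ValueError (excluded by Pre_)
  else
    let core := t.toList.filter (fun c => c ≠ ' ' ∧ c ≠ '\n')
    let transformed :=
      if decrypt_mode then (PySem.List.enumerate core 0).map (fun p => bDecChar k.toList p.1 p.2)
      else (PySem.List.enumerate core 0).map (fun p => bEncChar k.toList p.1 p.2)
    String.mk (bJoin t.toList transformed)

-- ===== PRECONDITION & SPEC =====
-- Pre_ excludes exactly the inputs where Python A raises: a ValueError on invalid
-- symbols in text or key, and a ZeroDivisionError (key[i % 0]) when the key is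
-- empty and the text is not.
def Pre_vernam_gamma_crypt (text : String) (key : String) (decrypt_mode : Bool) : Prop :=
  ((PySem.Chars.lower text.toList).all
      (fun c => decide ('a' ≤ c ∧ c ≤ 'z') || PySem.Chars.isspace c) = true)
  ∧ ((PySem.Chars.lower key.toList).all (fun c => decide ('a' ≤ c ∧ c ≤ 'z')) = true)
  ∧ (text = "" ∨ key ≠ "")

instance (text : String) (key : String) (decrypt_mode : Bool) : Decidable (Pre_vernam_gamma_crypt text key decrypt_mode) := by
  unfold Pre_vernam_gamma_crypt; infer_instance

def pvWitness_vernam_gamma_crypt : String × String × Bool := ("ab c", "k", false)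

def Spec_vernam_gamma_crypt (text : String) (key : String) (decrypt_mode : Bool) (out : String) : Prop := out = vernam_gamma_crypt_alt text key decrypt_mode
instance (text : String) (key : String) (decrypt_mode : Bool) (out : String) : Decidable (Spec_vernam_gamma_crypt text key decrypt_mode out) := by unfold Spec_vernam_gamma_crypt; infer_instance

-- ===== CLAIM (what is proved, stated in full; the proofs are below) =====
def Claim_equal_vernam_gamma_crypt : Prop := ∀ (text : String) (key : String) (decrypt_mode : Bool), Dom_vernam_gamma_crypt text key decrypt_mode → Pre_vernam_gamma_crypt text key decrypt_mode → Spec_vernam_gamma_crypt text key decrypt_mode (vernam_gamma_crypt text key decrypt_mode)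

-- ===== LEMMAS AND PROOFS =====

-- the per-character transform both sides compute (Nat index form)
def aChar (k : List Char) (dm : Bool) (i : Nat) (c : Char) : Char :=
  let gamma : Int := ((k.getD (i % k.length) 'a').toNat : Int) - 97
  let ch : Int := (c.toNat : Int) - 97
  Char.ofNat ((if dm then PySem.Int.mod (26 + ch - gamma) 26
               else PySem.Int.mod (ch + gamma) 26) + 97).toNat

-- reference result of A's loop, output built front-to-back
def specGo (k : List Char) (dm : Bool) : List Char → Nat → List Char
  | [], _ => []
  | c :: rest, i =>
    if c = ' ' ∨ c = '\n' then c :: specGo k dm rest i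
    else aChar k dm i c :: specGo k dm rest (i + 1)

-- transformed subsequence with indices starting at i
def mapIdx (k : List Char) (dm : Bool) : Nat → List Char → List Char
  | _, [] => []
  | i, c :: cs => aChar k dm i c :: mapIdx k dm (i + 1) cs

theorem aLoop_eq_specGo (k : List Char) (dm : Bool) (t : List Char) :
    ∀ (i : Nat) (res : List Char), aLoop k dm t i res = res ++ specGo k dm t i := by
  induction t with
  | nil => intro i res; simp [aLoop, specGo]
  | cons c rest ih =>
    intro i res
    by_cases h : c = ' ' ∨ c = '\n'
    · simp [aLoop, specGo, h, ih]
    · simp [aLoop, specGo, h, ih, aChar]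

theorem bJoin_eq_specGo (k : List Char) (dm : Bool) (t : List Char) :
    ∀ i : Nat, bJoin t (mapIdx k dm i (t.filter (fun c => c ≠ ' ' ∧ c ≠ '\n'))) = specGo k dm t i := by
  induction t with
  | nil => intro i; simp [bJoin, specGo]
  | cons c rest ih =>
    intro i
    by_cases h : c = ' ' ∨ c = '\n'
    · rw [List.filter_cons, if_neg (by rcases h with h | h <;> simp [h])]
      simp only [bJoin, specGo, if_pos h]
      exact congrArg _ (ih i)
    · rw [List.filter_cons, if_pos (by rcases not_or.mp h with ⟨h1, h2⟩; simp [h1, h2])]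
      simp only [bJoin, specGo, mapIdx, if_neg h]
      exact congrArg _ (ih (i + 1))

theorem enumerate_map_dec (k : List Char) (core : List Char) :
    ∀ s : Nat, (PySem.List.enumerate core (s : Int)).map (fun p => bDecChar k p.1 p.2) = mapIdx k true s core := by
  induction core with
  | nil => intro s; simp [PySem.List.enumerate_nil, mapIdx]
  | cons c cs ih =>
    intro s
    have hcast : ((s : Int) + 1) = (((s + 1 : Nat)) : Int) := by push_cast; ring
    rw [PySem.List.enumerate_cons, List.map_cons, hcast, ih (s + 1)]
    congr 1
    simp only [bDecChar, mapIdx, aChar, PySem.Int.mod_natCast, PySem.List.pyGet?_natCast,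
      List.getD_eq_getElem?_getD, if_true]

theorem enumerate_map_enc (k : List Char) (core : List Char) :
    ∀ s : Nat, (PySem.List.enumerate core (s : Int)).map (fun p => bEncChar k p.1 p.2) = mapIdx k false s core := by
  induction core with
  | nil => intro s; simp [PySem.List.enumerate_nil, mapIdx]
  | cons c cs ih =>
    intro s
    have hcast : ((s : Int) + 1) = (((s + 1 : Nat)) : Int) := by push_cast; ring
    rw [PySem.List.enumerate_cons, List.map_cons, hcast, ih (s + 1)]
    congr 1
    simp only [bEncChar, mapIdx, aChar, PySem.Int.mod_natCast, PySem.List.pyGet?_natCast,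
      List.getD_eq_getElem?_getD, Bool.false_eq_true, if_false]

-- ===== VERDICT (by name: the statement is the Claim_ definition above) =====
theorem vernam_gamma_crypt_spec : Claim_equal_vernam_gamma_crypt := by
  intro text key dm _ hpre
  obtain ⟨htext, hkey, hnz⟩ := hpre
  unfold Spec_vernam_gamma_crypt
  rw [List.all_eq_true] at htext hkey
  have P0 : ∀ x ∈ PySem.Chars.lower text.toList,
      ¬('a' ≤ x ∧ x ≤ 'z') → PySem.Chars.isspace x = true := by
    intro x hx hz
    have h := htext x hx
    simpa [hz] using h
  have P1 : ∀ x ∈ PySem.Chars.lower text.toList, isEnglishA x = false → PySem.Chars.isspace x = true := by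
    intro x hx hf
    refine P0 x hx fun hz => ?_
    simp [isEnglishA, hz] at hf
  have Q0 : ∀ x ∈ PySem.Chars.lower key.toList, 'a' ≤ x ∧ x ≤ 'z' := fun x hx =>
    of_decide_eq_true (hkey x hx)
  have P2 : ∀ x ∈ PySem.Chars.lower key.toList, isEnglishA x = true := fun x hx => by
    simp [isEnglishA, Q0 x hx]
  simp only [vernam_gamma_crypt, vernam_gamma_crypt_alt]
  rw [if_neg (by simp; exact P1), if_neg (by simp; exact P2),
    if_neg (by
      simp
      intro x hx h
      refine P0 x hx ?_
      rintro ⟨h1, h2⟩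
      rcases h with h | h
      · exact absurd h1 (not_le.mpr h)
      · exact absurd h2 (not_le.mpr h)),
    if_neg (by simp; exact Q0)]
  rw [aLoop_eq_specGo, List.nil_append]
  have henum0 : ∀ (core : List Char),
      (if dm then (PySem.List.enumerate core (0 : Int)).map (fun p => bDecChar (PySem.Str.lower key).toList p.1 p.2)
       else (PySem.List.enumerate core (0 : Int)).map (fun p => bEncChar (PySem.Str.lower key).toList p.1 p.2))
      = mapIdx (PySem.Str.lower key).toList dm 0 core := by
    intro core
    cases dm
    · simpa using enumerate_map_enc (PySem.Str.lower key).toList core 0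
    · simpa using enumerate_map_dec (PySem.Str.lower key).toList core 0
  rw [henum0, bJoin_eq_specGo]
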